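-- pv_equiv track=rewrite | github.com/SomeEarth31/Excel_Parser | Excel-Parser.py | clean_double_data
-- ===== SOURCE A (Python) =====
-- def clean_double_data(x, y):
-- #cleans pair of data CORRECTLY so that there are no empty spaces
--     x_new=[]
--     y_new=[]
--     x__new=[]
--     y__new=[]
--     for i in range(0, len(x)):
--         if x[i] is not None:
--             x_new.append(x[i])
--             y_new.append(y[i])
--
--     for i in range(0, len(y_new)):
--        if y_new[i] is not None:
--            y__new.append(y_new[i])
--            x__new.append(x_new[i])
--
--     return x__new, y__new
-- ===== SOURCE B (Python) =====
-- def clean_double_data(x, y):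
--     # single pass, no intermediate half-filtered lists; y[i] is only touched
--     # after the x[i] check, so it raises IndexError exactly where A does
--     x_out = []
--     y_out = []
--     for i in range(len(x)):
--         if x[i] is not None and y[i] is not None:
--             x_out.append(x[i])
--             y_out.append(y[i])
--     return x_out, y_out
-- ===== Notes on version B (the rewrite author's own statement) =====
-- stated objective: simpler
-- what changed: Replaces A's two sequential filtering passes with four intermediate lists by a single pass that appends a pair directly to the two result lists when both entries are non-None.
import Mathlib
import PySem

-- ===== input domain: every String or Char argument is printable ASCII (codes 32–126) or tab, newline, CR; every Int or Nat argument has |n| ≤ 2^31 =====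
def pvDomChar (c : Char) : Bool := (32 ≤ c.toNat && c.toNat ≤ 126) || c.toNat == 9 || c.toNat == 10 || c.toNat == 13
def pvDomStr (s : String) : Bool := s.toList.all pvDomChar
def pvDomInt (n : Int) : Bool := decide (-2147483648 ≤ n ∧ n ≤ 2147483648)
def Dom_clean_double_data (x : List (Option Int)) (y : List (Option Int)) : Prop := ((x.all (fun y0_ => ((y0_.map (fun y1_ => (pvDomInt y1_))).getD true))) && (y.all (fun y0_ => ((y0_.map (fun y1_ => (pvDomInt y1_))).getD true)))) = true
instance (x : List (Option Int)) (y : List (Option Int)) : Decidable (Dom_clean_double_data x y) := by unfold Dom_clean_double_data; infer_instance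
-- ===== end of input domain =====

-- B replaces A's two sequential filtering passes (four intermediate lists) by a single
-- pass appending each pair with both entries non-None to the two result lists (objective: simpler).

-- ===== PORT A =====
-- y[i] raises IndexError in Python when i ≥ len(y); Pre_ excludes exactly those inputs,
-- so pyGetD with default none only stands in for indices Pre_ guarantees never occur.
def clean_double_data (x : List (Option Int)) (y : List (Option Int)) : List Int × List Int :=
  let s1 : List Int × List (Option Int) :=
    (PySem.List.pyRange 0 (x.length : Int) 1).foldl
      (fun st i =>
        match PySem.List.pyGetD x i none with
        | some v => (st.1 ++ [v], st.2 ++ [PySem.List.pyGetD y i none])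
        | none => st) ([], [])
  let s2 : List Int × List Int :=
    (PySem.List.pyRange 0 (s1.2.length : Int) 1).foldl
      (fun st i =>
        match PySem.List.pyGetD s1.2 i none with
        | some w => (st.1 ++ [PySem.List.pyGetD s1.1 i 0], st.2 ++ [w])
        | none => st) ([], [])
  (s2.1, s2.2)

-- ===== PORT B =====
-- as in A's port, Python's y[i] (reached only when x[i] is not None, short-circuit)
-- raises IndexError when i ≥ len(y); Pre_ excludes exactly those inputs, so the
-- pyGetD default none never fires inside Pre_.
def clean_double_data_alt (x : List (Option Int)) (y : List (Option Int)) : List Int × List Int :=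
  (PySem.List.pyRange 0 (x.length : Int) 1).foldl
    (fun st i =>
      match PySem.List.pyGetD x i none, PySem.List.pyGetD y i none with
      | some v, some w => (st.1 ++ [v], st.2 ++ [w])
      | _, _ => st) ([], [])

-- ===== PRECONDITION & SPEC =====
-- Pre_ excludes exactly the inputs on which Python A raises IndexError:
-- those with a non-None x[i] at an index i ≥ len(y) (B raises there too).
def Pre_clean_double_data (x : List (Option Int)) (y : List (Option Int)) : Prop :=
  ∀ i ∈ List.range x.length, x.getD i none ≠ none → i < y.length
instance (x : List (Option Int)) (y : List (Option Int)) : Decidable (Pre_clean_double_data x y) := by unfold Pre_clean_double_data; infer_instance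
def pvWitness_clean_double_data : List (Option Int) × List (Option Int) := ([some 1, none, some 3], [some 4, some 5, none])

def Spec_clean_double_data (x : List (Option Int)) (y : List (Option Int)) (out : List Int × List Int) : Prop := out = clean_double_data_alt x y
instance (x : List (Option Int)) (y : List (Option Int)) (out : List Int × List Int) : Decidable (Spec_clean_double_data x y out) := by unfold Spec_clean_double_data; infer_instance

-- ===== CLAIM (what is proved, stated in full; the proofs are below) =====
def Claim_equal_clean_double_data : Prop := ∀ (x : List (Option Int)) (y : List (Option Int)), Dom_clean_double_data x y → Pre_clean_double_data x y → Spec_clean_double_data x y (clean_double_data x y)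

-- ===== LEMMAS AND PROOFS =====

-- zip of xs with ys padded (on the right) with a default, the list the loops walk
def padZip {α β : Type} (db : β) : List α → List β → List (α × β)
  | [], _ => []
  | a :: xs, [] => (a, db) :: padZip db xs []
  | a :: xs, b :: ys => (a, b) :: padZip db xs ys

theorem padZip_eq {α β : Type} (db : β) :
    ∀ (xs : List α) (ys : List β),
      padZip db xs ys = xs.zip ys ++ (xs.drop ys.length).map (fun a => (a, db)) := by
  intro xs
  induction xs with
  | nil => intro ys; simp [padZip]
  | cons a xs ih =>
    intro ys
    cases ys with
    | nil => simp [padZip, ih]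
    | cons b ys => simp [padZip, ih, List.zip]

theorem foldl_pyRange_nat {γ : Type} (n : Nat) (g : γ → Int → γ) (acc : γ) :
    (PySem.List.pyRange 0 (n : Int) 1).foldl g acc
      = (List.range n).foldl (fun (a : γ) (k : Nat) => g a (k : Int)) acc := by
  rw [PySem.List.pyRange_one, List.foldl_map]
  simp only [Int.sub_zero, Int.toNat_natCast, zero_add]

theorem foldl_range_getD₂ {α β γ : Type} (da : α) (db : β) (g : γ → α → β → γ) :
    ∀ (xs : List α) (ys : List β) (acc : γ),
      (List.range xs.length).foldl (fun a i => g a (xs.getD i da) (ys.getD i db)) acc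
        = (padZip db xs ys).foldl (fun a p => g a p.1 p.2) acc := by
  intro xs
  induction xs with
  | nil => intro ys acc; simp [padZip]
  | cons a xs ih =>
    intro ys acc
    simp only [List.length_cons]
    rw [List.range_succ_eq_map, List.foldl_cons, List.foldl_map]
    cases ys with
    | nil =>
      simp only [List.getD_cons_zero, List.getD_nil, padZip, List.foldl_cons]
      exact ih [] _
    | cons b ys =>
      simp only [List.getD_cons_zero, List.getD_cons_succ, padZip, List.foldl_cons]
      exact ih ys _

-- the element tests the three loops perform, as filterMap functions
def fsel1 (p : Option Int × Option Int) : Option (Int × Option Int) := p.1.map (fun v => (v, p.2))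
def fsel2 (p : Option Int × Int) : Option (Int × Int) := p.1.map (fun w => (p.2, w))
def fselB (p : Option Int × Option Int) : Option (Int × Int) := p.1.bind (fun v => p.2.map (fun w => (v, w)))

theorem fold1_eq :
    ∀ (L : List (Option Int × Option Int)) (acc : List Int × List (Option Int)),
      L.foldl (fun a p => match p.1 with
          | some v => (a.1 ++ [v], a.2 ++ [p.2])
          | none => a) acc
        = (acc.1 ++ (L.filterMap fsel1).map (·.1), acc.2 ++ (L.filterMap fsel1).map (·.2)) := by
  intro L
  induction L with
  | nil => intro acc; simp
  | cons p L ih =>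
    intro acc
    rcases p with ⟨u, b⟩
    cases u <;> simp [fsel1, ih]

theorem fold2_eq :
    ∀ (L : List (Option Int × Int)) (acc : List Int × List Int),
      L.foldl (fun a p => match p.1 with
          | some w => (a.1 ++ [p.2], a.2 ++ [w])
          | none => a) acc
        = (acc.1 ++ (L.filterMap fsel2).map (·.1), acc.2 ++ (L.filterMap fsel2).map (·.2)) := by
  intro L
  induction L with
  | nil => intro acc; simp
  | cons p L ih =>
    intro acc
    rcases p with ⟨u, b⟩
    cases u <;> simp [fsel2, ih]

theorem foldB_eq :
    ∀ (L : List (Option Int × Option Int)) (acc : List Int × List Int),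
      L.foldl (fun a p => match p.1, p.2 with
          | some v, some w => (a.1 ++ [v], a.2 ++ [w])
          | _, _ => a) acc
        = (acc.1 ++ (L.filterMap fselB).map (·.1), acc.2 ++ (L.filterMap fselB).map (·.2)) := by
  intro L
  induction L with
  | nil => intro acc; simp
  | cons p L ih =>
    intro acc
    rcases p with ⟨u, b⟩
    cases u <;> cases b <;> simp [fselB, ih]

theorem drop_length_map {α β : Type} (f : α → β) (L : List α) : (L.map f).drop L.length = [] := by
  simp

theorem clean_double_data_eq (x y : List (Option Int)) :
    clean_double_data x y = clean_double_data_alt x y := by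
  have e1 : (List.range x.length).foldl
      (fun (a : List Int × List (Option Int)) (k : Nat) =>
        match x.getD k none with
        | some v => (a.1 ++ [v], a.2 ++ [y.getD k none])
        | none => a) ([], [])
      = (padZip none x y).foldl
        (fun a p => match p.1 with
          | some v => (a.1 ++ [v], a.2 ++ [p.2])
          | none => a) ([], []) :=
    foldl_range_getD₂ none none
      (fun a u b => match u with
        | some v => (a.1 ++ [v], a.2 ++ [b])
        | none => a) x y ([], [])
  have eB : (List.range x.length).foldl
      (fun (a : List Int × List Int) (k : Nat) =>
        match x.getD k none, y.getD k none with
        | some v, some w => (a.1 ++ [v], a.2 ++ [w])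
        | _, _ => a) ([], [])
      = (padZip none x y).foldl
        (fun a p => match p.1, p.2 with
          | some v, some w => (a.1 ++ [v], a.2 ++ [w])
          | _, _ => a) ([], []) :=
    foldl_range_getD₂ none none
      (fun (a : List Int × List Int) (u b : Option Int) => match u, b with
        | some v, some w => (a.1 ++ [v], a.2 ++ [w])
        | _, _ => a) x y ([], [])
  unfold clean_double_data clean_double_data_alt
  simp only [foldl_pyRange_nat, PySem.List.pyGetD_natCast]
  rw [e1, fold1_eq, eB, foldB_eq]
  simp only [List.nil_append]
  have e2 : (List.range ((((padZip none x y).filterMap fsel1).map (·.2)).length)).foldl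
      (fun (a : List Int × List Int) (k : Nat) =>
        match (((padZip none x y).filterMap fsel1).map (·.2)).getD k none with
        | some w => (a.1 ++ [(((padZip none x y).filterMap fsel1).map (·.1)).getD k 0], a.2 ++ [w])
        | none => a) ([], [])
      = (padZip 0 (((padZip none x y).filterMap fsel1).map (·.2))
            (((padZip none x y).filterMap fsel1).map (·.1))).foldl
        (fun a p => match p.1 with
          | some w => (a.1 ++ [p.2], a.2 ++ [w])
          | none => a) ([], []) :=
    foldl_range_getD₂ none 0
      (fun (a : List Int × List Int) (u : Option Int) (b : Int) => match u with
        | some w => (a.1 ++ [b], a.2 ++ [w])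
        | none => a)
      (((padZip none x y).filterMap fsel1).map (·.2))
      (((padZip none x y).filterMap fsel1).map (·.1)) ([], [])
  rw [e2, fold2_eq]
  simp only [List.nil_append]
  have hsel : (fun p => (fsel1 p).bind (fsel2 ∘ fun a => (a.2, a.1))) = fselB := by
    funext p
    rcases p with ⟨u, b⟩
    cases u <;> rfl
  rw [padZip_eq 0]
  simp only [List.length_map, drop_length_map, List.map_nil, List.append_nil]
  rw [List.zip_map', List.filterMap_map, List.filterMap_filterMap, hsel]

-- ===== VERDICT (by name: the statement is the Claim_ definition above) =====
theorem clean_double_data_spec : Claim_equal_clean_double_data := by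
  intro x y _ _
  unfold Spec_clean_double_data
  exact clean_double_data_eq x y
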